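-- pv_equiv track=rewrite | github.com/beagles/tripleo-ansible | tripleo_ansible/ansible_plugins/filter/helpers.py | subsort
-- ===== SOURCE A (Python) =====
-- def subsort(dict_to_sort, attribute, null_value=0):
--     """Sort a hash from a sub-element.
--
--     This filter will return an dictionary ordered by the attribute
--     part of each item.
--     """
--     for k, v in dict_to_sort.items():
--         if attribute not in v:
--             dict_to_sort[k][attribute] = null_value
--
--     data = {}
--     for d in dict_to_sort.items():
--         if d[1][attribute] not in data:
--             data[d[1][attribute]] = []
--         data[d[1][attribute]].append({d[0]: d[1]})
--
--     sorted_list = sorted(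
--         data.items(),
--         key=lambda x: x[0]
--     )
--     ordered_dict = {}
--     for o, v in sorted_list:
--         ordered_dict[o] = v
--     return ordered_dict
-- ===== SOURCE B (Python) =====
-- def subsort(dict_to_sort, attribute, null_value=0):
--     # Same in-place fix-up as the original: give every item the attribute.
--     for v in dict_to_sort.values():
--         if attribute not in v:
--             v[attribute] = null_value
--
--     # One stable sort of all items keyed by the attribute value, then one
--     # scan grouping consecutive runs of equal keys (no intermediate hash of
--     # buckets): sort-then-group instead of bucket-then-sort-keys.
--     pairs = sorted(
--         [(v[attribute], {k: v}) for k, v in dict_to_sort.items()],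
--         key=lambda p: p[0]
--     )
--     out = {}
--     i = 0
--     n = len(pairs)
--     while i < n:
--         a = pairs[i][0]
--         group = []
--         j = i
--         while j < n and pairs[j][0] == a:
--             group.append(pairs[j][1])
--             j += 1
--         out[a] = group
--         i = j
--     return out
-- ===== Notes on version B (the rewrite author's own statement) =====
-- stated objective: alternative
-- what changed: A buckets items into a hash keyed by the attribute value and then sorts the bucket keys; B stably sorts the (attribute value, item) pairs once and builds the result in a single scan over consecutive runs of equal keys, with no intermediate bucket dict.
import Mathlib
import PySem

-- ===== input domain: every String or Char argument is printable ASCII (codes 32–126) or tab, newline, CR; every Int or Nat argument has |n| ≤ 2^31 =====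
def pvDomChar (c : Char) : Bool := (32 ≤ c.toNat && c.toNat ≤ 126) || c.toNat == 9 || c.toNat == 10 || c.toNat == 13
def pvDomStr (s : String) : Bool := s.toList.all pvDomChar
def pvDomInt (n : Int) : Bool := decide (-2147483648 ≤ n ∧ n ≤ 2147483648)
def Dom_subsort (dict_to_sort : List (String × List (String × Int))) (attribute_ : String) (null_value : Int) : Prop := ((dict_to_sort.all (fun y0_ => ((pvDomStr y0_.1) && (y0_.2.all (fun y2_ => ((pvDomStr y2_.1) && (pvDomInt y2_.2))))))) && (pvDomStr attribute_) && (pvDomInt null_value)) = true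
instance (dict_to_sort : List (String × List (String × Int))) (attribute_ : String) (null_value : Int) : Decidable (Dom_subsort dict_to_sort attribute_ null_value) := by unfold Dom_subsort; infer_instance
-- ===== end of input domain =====

-- B replaces A's bucket-into-hash-then-sort-keys with one stable sort of the items followed by a
-- single grouping scan over consecutive equal keys (objective: alternative decomposition; both
-- Pythons mutate dict_to_sort in place identically — the equivalence proved is about the return value).

-- ===== PORT A =====
-- shared by both ports because both Pythons contain the identical first loop
-- ('if attribute not in v: v[attribute] = null_value') and the identical lookup v[attribute]:
-- the in-place fix-up of one inner dict …
def pvFix (attribute_ : String) (null_value : Int) (v : List (String × Int)) : List (String × Int) :=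
  if (PySem.Dict.mk v).contains attribute_ then v
  else ((PySem.Dict.mk v).insert attribute_ null_value).items

-- … and v[attribute]; after the fix-up loop the key is always present, so the default is never consulted
def pvAttr (attribute_ : String) (null_value : Int) (v : List (String × Int)) : Int :=
  (PySem.Dict.mk v).getD attribute_ null_value

def subsort (dict_to_sort : List (String × List (String × Int))) (attribute_ : String) (null_value : Int) : List (Int × List (List (String × List (String × Int)))) :=
  -- first loop: mutate dict_to_sort in place
  let fixed := dict_to_sort.map (fun kv => (kv.1, pvFix attribute_ null_value kv.2))
  -- second loop: bucket the items into the dict 'data'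
  let data := fixed.foldl
    (fun (data : PySem.Dict Int (List (List (String × List (String × Int))))) d =>
      let a := pvAttr attribute_ null_value d.2
      let data1 := if data.contains a then data else data.insert a []
      data1.insert a (data1.getD a [] ++ [[(d.1, d.2)]]))
    PySem.Dict.empty
  -- sorted(data.items(), key=lambda x: x[0])
  let sortedList := PySem.List.sorted data.items (fun x => x.1)
  -- rebuild ordered_dict
  (sortedList.foldl
    (fun (od : PySem.Dict Int (List (List (String × List (String × Int))))) ov => od.insert ov.1 ov.2)
    PySem.Dict.empty).items

-- ===== PORT B =====
-- the outer while loop of Source B: take the run of pairs sharing the first key, store it, jump past it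
def pvGroupRuns {β : Type} (pairs : List (Int × β)) (out : PySem.Dict Int (List β)) : PySem.Dict Int (List β) :=
  match pairs with
  | [] => out
  | (a, x) :: rest =>
      let run := rest.takeWhile (fun p => p.1 == a)
      pvGroupRuns (rest.dropWhile (fun p => p.1 == a)) (out.insert a (x :: run.map (fun p => p.2)))
termination_by pairs.length
decreasing_by simpa using Nat.lt_succ_of_le (List.length_dropWhile_le _ _)

def subsort_alt (dict_to_sort : List (String × List (String × Int))) (attribute_ : String) (null_value : Int) : List (Int × List (List (String × List (String × Int)))) :=
  -- identical first loop: mutate dict_to_sort in place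
  let fixed := dict_to_sort.map (fun kv => (kv.1, pvFix attribute_ null_value kv.2))
  -- pairs = sorted([(v[attribute], {k: v}) for k, v in ...], key=lambda p: p[0])
  let pairs := fixed.map (fun kv => (pvAttr attribute_ null_value kv.2, [(kv.1, kv.2)]))
  let sortedPairs := PySem.List.sorted pairs (fun p => p.1)
  -- grouping scan
  (pvGroupRuns sortedPairs PySem.Dict.empty).items

-- ===== PRECONDITION & SPEC =====
def Spec_subsort (dict_to_sort : List (String × List (String × Int))) (attribute_ : String) (null_value : Int) (out : List (Int × List (List (String × List (String × Int))))) : Prop := out = subsort_alt dict_to_sort attribute_ null_value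
instance (dict_to_sort : List (String × List (String × Int))) (attribute_ : String) (null_value : Int) (out : List (Int × List (List (String × List (String × Int))))) : Decidable (Spec_subsort dict_to_sort attribute_ null_value out) := by
  unfold Spec_subsort
  haveI : DecidableEq (List (String × List (String × Int))) := inferInstance
  haveI : DecidableEq (List (List (String × List (String × Int)))) := inferInstance
  haveI : DecidableEq (Int × List (List (String × List (String × Int)))) := inferInstance
  infer_instance

-- ===== CLAIM (what is proved, stated in full; the proofs are below) =====
def Claim_equal_subsort : Prop := ∀ (dict_to_sort : List (String × List (String × Int))) (attribute_ : String) (null_value : Int), Dom_subsort dict_to_sort attribute_ null_value → Spec_subsort dict_to_sort attribute_ null_value (subsort dict_to_sort attribute_ null_value)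

-- ===== LEMMAS AND PROOFS =====


theorem pv_step_eq {β : Type} (data : PySem.Dict Int (List β)) (a : Int) (x : β) :
    (let data1 := if data.contains a then data else data.insert a []
     data1.insert a (data1.getD a [] ++ [x])) = data.modify a [] (fun g => g ++ [x]) := by
  by_cases h : data.contains a
  · simp [h, PySem.Dict.modify]
  · simp only [h, if_neg, Bool.false_eq_true, not_false_iff]
    rw [PySem.Dict.getD_insert_self, PySem.Dict.insert_insert_self, PySem.Dict.modify,
      PySem.Dict.getD_of_not_contains (h := by simpa using h)]

theorem pv_foldl_add_cons (a : Int) (l : List Int) (h : ∀ b ∈ l, b ≠ a) (s : List Int) :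
    List.foldl PySem.Set.add (a :: s) l = a :: List.foldl PySem.Set.add s l := by
  induction l generalizing s with
  | nil => rfl
  | cons b t ih =>
    have hb : b ≠ a := h b (by simp)
    have hs : PySem.Set.add (a :: s) b = a :: PySem.Set.add s b := by
      simp [PySem.Set.add, PySem.Set.contains, hb]
      split <;> simp
    rw [List.foldl_cons, hs, List.foldl_cons, ih (fun b hb => h b (by simp [hb]))]

theorem pv_ofList_run (a : Int) (l1 l2 : List Int)
    (h1 : ∀ b ∈ l1, b = a) (h2 : ∀ b ∈ l2, b ≠ a) :
    PySem.Set.ofList (a :: (l1 ++ l2)) = a :: PySem.Set.ofList l2 := by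
  have hl1 : List.foldl PySem.Set.add [a] l1 = [a] := by
    induction l1 with
    | nil => rfl
    | cons b t ih =>
      have hb : b = a := h1 b (by simp)
      subst hb
      rw [List.foldl_cons]
      have : PySem.Set.add [b] b = [b] := by simp [PySem.Set.add, PySem.Set.contains]
      rw [this, ih (fun c hc => h1 c (by simp [hc]))]
  show List.foldl PySem.Set.add PySem.Set.empty (a :: (l1 ++ l2)) = _
  rw [List.foldl_cons, List.foldl_append]
  have : PySem.Set.add PySem.Set.empty a = [a] := rfl
  rw [this, hl1]
  exact pv_foldl_add_cons a l2 h2 []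

theorem pv_dropWhile_gt {β : Type} (a : Int) (rest : List (Int × β))
    (h1 : ∀ p ∈ rest, a ≤ p.1) (h2 : rest.Pairwise (fun p q => p.1 ≤ q.1)) :
    ∀ p ∈ rest.dropWhile (fun p => p.1 == a), a < p.1 := by
  induction rest with
  | nil => simp
  | cons y t ih =>
    by_cases hy : y.1 = a
    · rw [List.dropWhile_cons_of_pos (by simp [hy])]
      exact ih (fun p hp => h1 p (by simp [hp])) (List.pairwise_cons.mp h2).2
    · rw [List.dropWhile_cons_of_neg (by simp [hy])]
      intro p hp
      have hya : a < y.1 := lt_of_le_of_ne (h1 y (by simp)) (Ne.symm hy)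
      rcases List.mem_cons.mp hp with h | h
      · subst h; exact hya
      · exact lt_of_lt_of_le hya ((List.pairwise_cons.mp h2).1 p h)

theorem pv_ofList_sublist (xs : List Int) : (PySem.Set.ofList xs).Sublist xs := by
  have key : ∀ (l s : List Int), (List.foldl PySem.Set.add s l).Sublist (s ++ l) := by
    intro l
    induction l with
    | nil => simp
    | cons b t ih =>
      intro s
      rw [List.foldl_cons]
      refine (ih (PySem.Set.add s b)).trans ?_
      by_cases h : PySem.Set.contains s b
      · simp only [PySem.Set.add, h, if_pos]
        exact List.Sublist.append_left (List.sublist_cons_self b t) s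
      · simp only [PySem.Set.add, h, if_neg, Bool.false_eq_true, not_false_iff]
        simp
  simpa using key xs []

theorem pv_ofList_pairwise_lt (xs : List Int) (hs : xs.Pairwise (· ≤ ·)) :
    (PySem.Set.ofList xs).Pairwise (· < ·) := by
  have hle := hs.sublist (pv_ofList_sublist xs)
  have hnd : (PySem.Set.ofList xs).Nodup := PySem.Set.nodup_ofList xs
  exact (hle.and hnd).imp (fun ⟨h1, h2⟩ => lt_of_le_of_ne h1 h2)


theorem pv_filter_insertBy {α : Type} (k : α → Int) (a : Int) (x : α) (ys : List α)
    (hs : ys.Pairwise (fun p q => k p ≤ k q)) :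
    (PySem.List.insertBy (fun p q => decide (k p < k q)) x ys).filter (fun y => k y == a) =
      if k x == a then ys.filter (fun y => k y == a) ++ [x]
      else ys.filter (fun y => k y == a) := by
  induction ys with
  | nil => simp [PySem.List.insertBy]; split <;> simp_all
  | cons y t ih =>
    by_cases hlt : k x < k y
    · have hnil : (y :: t).filter (fun z => k z == a) = [] ∨ ¬ (k x == a) := by
        by_cases hxa : k x = a
        · left
          rw [List.filter_eq_nil_iff]
          intro z hz
          have : k y ≤ k z := by
            rcases List.mem_cons.mp hz with h | h
            · subst h; rfl
            · exact (List.pairwise_cons.mp hs).1 z h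
          simp only [beq_iff_eq]
          omega
        · right; simp [hxa]
      rw [show PySem.List.insertBy (fun p q => decide (k p < k q)) x (y :: t) = x :: y :: t by
        simp [PySem.List.insertBy, hlt]]
      rcases hnil with h | h
      · by_cases hxa : k x == a
        · simp [hxa, h]
        · simp [hxa, h]
      · simp [List.filter_cons, h]
    · rw [show PySem.List.insertBy (fun p q => decide (k p < k q)) x (y :: t)
          = y :: PySem.List.insertBy (fun p q => decide (k p < k q)) x t by
        simp [PySem.List.insertBy, hlt]]
      have iht := ih (List.pairwise_cons.mp hs).2
      by_cases hya : k y == a <;> by_cases hxa : k x == a <;>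
        simp [hya, hxa, iht]

theorem pv_filter_sorted {α : Type} (k : α → Int) (a : Int) (l : List α) :
    (PySem.List.sorted l k).filter (fun y => k y == a) = l.filter (fun y => k y == a) := by
  induction l using List.reverseRecOn with
  | nil => simp [PySem.List.sorted]
  | append_singleton t x ih =>
    have h1 : PySem.List.sorted (t ++ [x]) k
        = PySem.List.insertBy (fun p q => decide (k p < k q)) x (PySem.List.sorted t k) := by
      rw [PySem.List.sorted_eq_foldl_insertBy, PySem.List.sorted_eq_foldl_insertBy,
        List.foldl_append]
      rfl
    rw [h1, pv_filter_insertBy k a x _ (PySem.List.sorted_pairwise t k), List.filter_append, ih]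
    by_cases hxa : k x == a <;> simp [hxa]

theorem pv_groupRuns_items {β : Type} (l : List (Int × β)) (out : PySem.Dict Int (List β))
    (hs : l.Pairwise (fun p q => p.1 ≤ q.1))
    (hfresh : ∀ p ∈ l, out.contains p.1 = false)
    (hnd : out.keys.Nodup) :
    (pvGroupRuns l out).items =
      out.items ++ (PySem.Set.ofList (l.map (fun p => p.1))).map
        (fun b => (b, (l.filter (fun p => p.1 == b)).map (fun p => p.2))) := by
  induction l, out using pvGroupRuns.induct with
  | case1 out => simp [pvGroupRuns]
  | case2 out a x rest run ih =>
    have hpc := List.pairwise_cons.mp hs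
    have hhead : ∀ p ∈ rest, a ≤ p.1 := fun p hp => hpc.1 p hp
    have hsrest : rest.Pairwise (fun p q => p.1 ≤ q.1) := hpc.2
    have hgt : ∀ p ∈ rest.dropWhile (fun p => p.1 == a), a < p.1 :=
      pv_dropWhile_gt a rest hhead hsrest
    have hrun : ∀ p ∈ run, p.1 = a := fun p hp => by
      simpa using List.mem_takeWhile_imp hp
    have hsdrop : (rest.dropWhile (fun p => p.1 == a)).Pairwise (fun p q => p.1 ≤ q.1) :=
      hsrest.sublist (List.dropWhile_sublist _)
    have hconta : out.contains a = false := by simpa using hfresh (a, x) (by simp)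
    have hfresh' : ∀ p ∈ rest.dropWhile (fun p => p.1 == a),
        (out.insert a (x :: run.map (fun p => p.2))).contains p.1 = false := by
      intro p hp
      rw [PySem.Dict.contains_insert]
      have h1 : out.contains p.1 = false :=
        hfresh p (List.mem_cons_of_mem _ ((List.dropWhile_sublist _).mem hp))
      have h2 : p.1 ≠ a := by have := hgt p hp; omega
      simp [h1, h2]
    have hnd' : (out.insert a (x :: run.map (fun p => p.2))).keys.Nodup :=
      PySem.Dict.nodup_keys_insert _ _ _ hnd
    have hitems : (out.insert a (x :: run.map (fun p => p.2))).items
        = out.items ++ [(a, x :: run.map (fun p => p.2))] :=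
      PySem.Dict.items_insert_of_not_contains out _ hconta
    have hsplit : run ++ rest.dropWhile (fun p => p.1 == a) = rest :=
      List.takeWhile_append_dropWhile
    rw [pvGroupRuns]
    rw [ih hsdrop hfresh' hnd', hitems]
    conv_rhs => rw [← hsplit]
    -- key list
    have hkeys : PySem.Set.ofList (List.map (fun p => p.1)
          ((a, x) :: (run ++ rest.dropWhile (fun p => p.1 == a))))
        = a :: PySem.Set.ofList (List.map (fun p => p.1) (rest.dropWhile (fun p => p.1 == a))) := by
      rw [List.map_cons, List.map_append]
      exact pv_ofList_run a _ _
        (fun b hb => by obtain ⟨p, hp, rfl⟩ := List.mem_map.mp hb; exact hrun p hp)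
        (fun b hb => by obtain ⟨p, hp, rfl⟩ := List.mem_map.mp hb; have := hgt p hp; omega)
    rw [hkeys, List.map_cons]
    -- head group
    have hfa : List.filter (fun p => p.1 == a)
          ((a, x) :: (run ++ rest.dropWhile (fun p => p.1 == a)))
        = (a, x) :: run := by
      rw [List.filter_cons_of_pos (by simp), List.filter_append,
        List.filter_eq_self.mpr (fun p hp => by simp [hrun p hp]),
        List.filter_eq_nil_iff.mpr (fun p hp => by have := hgt p hp; simp; omega)]
      simp
    rw [hfa]
    -- tail groups
    have htail : List.map (fun b => (b, List.map (fun p => p.2)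
            (List.filter (fun p => p.1 == b)
              ((a, x) :: (run ++ rest.dropWhile (fun p => p.1 == a))))))
          (PySem.Set.ofList (List.map (fun p => p.1) (rest.dropWhile (fun p => p.1 == a))))
        = List.map (fun b => (b, List.map (fun p => p.2)
            (List.filter (fun p => p.1 == b) (rest.dropWhile (fun p => p.1 == a)))))
          (PySem.Set.ofList (List.map (fun p => p.1) (rest.dropWhile (fun p => p.1 == a)))) := by
      apply List.map_congr_left
      intro b hb
      have hbmem : b ∈ List.map (fun p => p.1) (rest.dropWhile (fun p => p.1 == a)) :=
        (PySem.Set.mem_ofList _ _).mp hb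
      obtain ⟨q, hq, rfl⟩ := List.mem_map.mp hbmem
      have hba : a < q.1 := hgt q hq
      rw [List.filter_cons_of_neg (by simp; omega), List.filter_append,
        List.filter_eq_nil_iff.mpr (fun p hp => by have := hrun p hp; simp; omega)]
      simp
    rw [htail]
    simp

-- the annotated item list both programs work through: (attribute value, {k: v}) per item
def pvAnn (dict_to_sort : List (String × List (String × Int))) (attribute_ : String) (null_value : Int) : List (Int × List (String × List (String × Int))) :=
  (dict_to_sort.map (fun kv => (kv.1, pvFix attribute_ null_value kv.2))).map
    (fun kv => (pvAttr attribute_ null_value kv.2, [(kv.1, kv.2)]))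

-- the common normal form: ascending distinct attribute values, each with its group in input order
def pvCanon (dict_to_sort : List (String × List (String × Int))) (attribute_ : String) (null_value : Int) : List (Int × List (List (String × List (String × Int)))) :=
  (PySem.List.sorted (PySem.Set.ofList ((pvAnn dict_to_sort attribute_ null_value).map (fun p => p.1))) (fun x => x)).map
    (fun b => (b, ((pvAnn dict_to_sort attribute_ null_value).filter (fun p => p.1 == b)).map (fun p => p.2)))

theorem pv_A_eq_canon (dict_to_sort : List (String × List (String × Int))) (attribute_ : String) (null_value : Int) :
    subsort dict_to_sort attribute_ null_value = pvCanon dict_to_sort attribute_ null_value := by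
  unfold subsort
  simp only []
  -- turn A's bucket fold into the modify fold over pvAnn
  have hbody : ∀ (data : PySem.Dict Int (List (List (String × List (String × Int)))))
      (d : String × List (String × Int)),
      (if data.contains (pvAttr attribute_ null_value d.2) = true then data
        else data.insert (pvAttr attribute_ null_value d.2) []).insert
        (pvAttr attribute_ null_value d.2)
        ((if data.contains (pvAttr attribute_ null_value d.2) = true then data
            else data.insert (pvAttr attribute_ null_value d.2) []).getD
            (pvAttr attribute_ null_value d.2) [] ++ [[(d.1, d.2)]])
      = data.modify (pvAttr attribute_ null_value d.2) [] (fun g => g ++ [[(d.1, d.2)]]) :=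
    fun data d => pv_step_eq data _ _
  simp only [hbody]
  have hfold : (dict_to_sort.map (fun kv => (kv.1, pvFix attribute_ null_value kv.2))).foldl
      (fun data d => data.modify (pvAttr attribute_ null_value d.2) [] (fun g => g ++ [[(d.1, d.2)]]))
      PySem.Dict.empty
      = (pvAnn dict_to_sort attribute_ null_value).foldl
          (fun data p => data.modify p.1 [] (fun g => g ++ [p.2])) PySem.Dict.empty := by
    rw [pvAnn, List.foldl_map]
    rw [List.foldl_map]
    rw [List.foldl_map]
  rw [hfold]
  set ann := pvAnn dict_to_sort attribute_ null_value with hanndef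
  set D := ann.foldl (fun data p => data.modify p.1 [] (fun g => g ++ [p.2])) PySem.Dict.empty with hD
  have hkeys : D.keys = PySem.Set.ofList (ann.map (fun p => p.1)) := by
    rw [hD, PySem.Dict.keys_foldl_modify_key ann (fun p => p.1) [] (fun _ p => fun g => g ++ [p.2])]
    rfl
  have hnd : D.keys.Nodup := by
    rw [hD]
    exact PySem.Dict.nodup_keys_foldl_modify_key ann (fun p => p.1) [] (fun _ p => fun g => g ++ [p.2]) _ (by simp)
  have hgetD : ∀ b, D.getD b [] = (ann.filter (fun p => p.1 == b)).map (fun p => p.2) := by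
    intro b
    rw [hD, PySem.Dict.getD_foldl_modify_append]
    simp
  have hitems : D.items = (PySem.Set.ofList (ann.map (fun p => p.1))).map
      (fun b => (b, (ann.filter (fun p => p.1 == b)).map (fun p => p.2))) := by
    rw [PySem.Dict.items_eq_map_keys D hnd [], hkeys]
    exact List.map_congr_left (fun b _ => by rw [hgetD b])
  rw [hitems]
  set K := PySem.Set.ofList (ann.map (fun p => p.1)) with hK
  set F := (fun b => (b, (ann.filter (fun p => p.1 == b)).map (fun p => p.2))) with hF
  have hSK : PySem.List.sorted (K.map F) (fun x => x.1) = (PySem.List.sorted K (fun x => x)).map F := by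
    apply PySem.List.sorted_eq_of_perm_of_pairwise_lt
    · exact (PySem.List.sorted_perm K _ _).map F
    · rw [List.pairwise_map]
      have := PySem.List.sorted_ofList_pairwise_lt (κ := Int) (ann.map (fun p => p.1))
      rw [← hK] at this
      simpa [hF] using this
  rw [hSK]
  have hSKnodup : (PySem.List.sorted K (fun x => x)).Nodup := by
    have := PySem.List.sorted_ofList_pairwise_lt (κ := Int) (ann.map (fun p => p.1))
    rw [← hK] at this
    exact this.imp (fun h => ne_of_lt h)
  rw [PySem.Dict.items_foldl_insert_fresh ((PySem.List.sorted K (fun x => x)).map F)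
      (fun p => p.1) (fun p => p.2) PySem.Dict.empty (by simp)
      (by rw [List.map_map, show ((fun (p : Int × List (List (String × List (String × Int)))) => p.1) ∘ F) = (fun b => b) from rfl]
          simpa using hSKnodup)]
  rw [show (PySem.Dict.empty : PySem.Dict Int (List (List (String × List (String × Int))))).items = [] from rfl]
  rw [pvCanon, ← hanndef, ← hK]
  simp [hF]

theorem pv_B_eq_canon (dict_to_sort : List (String × List (String × Int))) (attribute_ : String) (null_value : Int) :
    subsort_alt dict_to_sort attribute_ null_value = pvCanon dict_to_sort attribute_ null_value := by
  unfold subsort_alt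
  simp only []
  have hann : (dict_to_sort.map (fun kv => (kv.1, pvFix attribute_ null_value kv.2))).map
      (fun kv => (pvAttr attribute_ null_value kv.2, [(kv.1, kv.2)]))
      = pvAnn dict_to_sort attribute_ null_value := rfl
  rw [hann]
  set ann := pvAnn dict_to_sort attribute_ null_value with hanndef
  set SP := PySem.List.sorted ann (fun p => p.1) with hSP
  rw [pv_groupRuns_items SP PySem.Dict.empty
    (by rw [hSP]; exact PySem.List.sorted_pairwise ann _)
    (by simp) (by simp)]
  have hfilters : ∀ b, SP.filter (fun p => p.1 == b) = ann.filter (fun p => p.1 == b) := by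
    intro b
    rw [hSP]
    exact pv_filter_sorted (fun p => p.1) b ann
  have hkeysEq : PySem.Set.ofList (SP.map (fun p => p.1))
      = PySem.List.sorted (PySem.Set.ofList (ann.map (fun p => p.1))) (fun x => x) := by
    symm
    apply PySem.List.sorted_eq_of_perm_of_pairwise_lt
    · apply (List.perm_ext_iff_of_nodup (PySem.Set.nodup_ofList _) (PySem.Set.nodup_ofList _)).mpr
      intro b
      rw [PySem.Set.mem_ofList, PySem.Set.mem_ofList]
      exact ((PySem.List.sorted_perm ann (fun p => p.1) false).map (fun p => p.1)).mem_iff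
    · apply pv_ofList_pairwise_lt
      rw [List.pairwise_map, hSP]
      exact PySem.List.sorted_pairwise ann _
  rw [hkeysEq]
  rw [show (PySem.Dict.empty : PySem.Dict Int (List (List (String × List (String × Int))))).items = [] from rfl]
  rw [pvCanon, ← hanndef]
  simp only [List.nil_append]
  exact List.map_congr_left (fun b _ => by rw [hfilters b])


-- ===== VERDICT (by name: the statement is the Claim_ definition above) =====
theorem subsort_spec : Claim_equal_subsort := by
  intro dict_to_sort attribute_ null_value _
  unfold Spec_subsort
  rw [pv_A_eq_canon, pv_B_eq_canon]
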